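-- pv_equiv track=rewrite | github.com/haochencheng/Agents-Memory | agents_memory/services/integration.py | _doctor_bootstrap_checklist
-- ===== SOURCE A (Python) =====
-- def _doctor_group_status(group_checks: list[tuple[str, str, str]]) -> str:
--     statuses = [status for status, _key, _detail in group_checks]
--     if any(status == "FAIL" for status in statuses):
--         return "ATTENTION"
--     if any(status == "WARN" for status in statuses):
--         return "WATCH"
--     return "HEALTHY"
--
-- def _doctor_group_summary(group_name: str, group_checks: list[tuple[str, str, str]]) -> str:
--     counts = {"OK": 0, "WARN": 0, "FAIL": 0, "INFO": 0}
--     for status, _key, _detail in group_checks: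
--         counts[status] = counts.get(status, 0) + 1
--     return (
--         f"{group_name} status={_doctor_group_status(group_checks)} "
--         f"(ok={counts['OK']}, warn={counts['WARN']}, fail={counts['FAIL']}, info={counts['INFO']})"
--     )
--
-- def _doctor_bootstrap_checklist(grouped_checks: list[tuple[str, list[tuple[str, str, str]]]], runbook_steps: list[dict[str, object]]) -> list[str]:
--     checklist: list[str] = []
--     for group_name, group_checks in grouped_checks:
--         group_status = _doctor_group_status(group_checks)
--         checked = "[x]" if group_status == "HEALTHY" else "[ ]"
--         checklist.append(f"{checked} {group_name} - {_doctor_group_summary(group_name, group_checks)}")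
--     final_checked = "[x]" if not runbook_steps else "[ ]"
--     final_detail = "re-run `amem doctor .` and confirm no remaining WARN / FAIL steps" if runbook_steps else "latest `amem doctor .` already reflects the current healthy state"
--     checklist.append(f"{final_checked} Final verification - {final_detail}")
--     return checklist
-- ===== SOURCE B (Python) =====
-- def _doctor_bootstrap_checklist(grouped_checks, runbook_steps):
--     lines = []
--     for group_name, group_checks in grouped_checks:
--         ok = warn = fail = info = 0
--         for status, _key, _detail in group_checks:
--             if status == "OK":
--                 ok += 1
--             elif status == "WARN":
--                 warn += 1
--             elif status == "FAIL":
--                 fail += 1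
--             elif status == "INFO":
--                 info += 1
--         status_word = "ATTENTION" if fail > 0 else ("WATCH" if warn > 0 else "HEALTHY")
--         box = "[ ]" if fail > 0 or warn > 0 else "[x]"
--         lines.append(
--             f"{box} {group_name} - {group_name} status={status_word} "
--             f"(ok={ok}, warn={warn}, fail={fail}, info={info})"
--         )
--     if runbook_steps:
--         lines.append("[ ] Final verification - re-run `amem doctor .` and confirm no remaining WARN / FAIL steps")
--     else:
--         lines.append("[x] Final verification - latest `amem doctor .` already reflects the current healthy state")
--     return lines
-- ===== Notes on version B (the rewrite author's own statement) =====
-- stated objective: simpler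
-- what changed: Replaces the two any() scans plus a dict-counting loop (three traversals per group, two helper functions) by a single pass per group accumulating four integer counters, from which status, checkbox and summary are derived directly; the two group-line pieces are fused into one f-string.
import Mathlib
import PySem

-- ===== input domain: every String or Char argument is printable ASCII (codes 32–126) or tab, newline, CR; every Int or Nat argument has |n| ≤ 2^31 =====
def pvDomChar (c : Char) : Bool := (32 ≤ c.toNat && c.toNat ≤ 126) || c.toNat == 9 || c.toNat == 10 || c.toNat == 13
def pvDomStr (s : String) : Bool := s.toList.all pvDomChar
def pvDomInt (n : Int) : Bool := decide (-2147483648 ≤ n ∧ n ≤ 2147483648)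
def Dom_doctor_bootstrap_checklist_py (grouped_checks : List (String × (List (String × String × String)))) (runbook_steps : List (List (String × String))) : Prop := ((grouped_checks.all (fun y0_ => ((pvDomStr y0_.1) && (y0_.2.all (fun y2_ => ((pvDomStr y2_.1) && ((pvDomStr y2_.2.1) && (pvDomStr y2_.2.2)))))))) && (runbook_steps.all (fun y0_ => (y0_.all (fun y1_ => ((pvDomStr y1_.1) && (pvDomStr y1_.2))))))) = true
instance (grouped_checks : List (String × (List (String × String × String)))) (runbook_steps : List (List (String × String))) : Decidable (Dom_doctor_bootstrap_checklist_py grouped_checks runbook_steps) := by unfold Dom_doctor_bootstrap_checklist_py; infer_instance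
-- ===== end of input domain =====

-- B replaces A's three scans per group (two any() + a dict-count loop in two helpers) by one
-- fused pass accumulating four counters from which status, checkbox and summary are derived.

-- ===== PORT A =====
-- _doctor_group_status
def pvA_group_status (group_checks : List (String × String × String)) : String :=
  let statuses := group_checks.map (fun t => t.1)
  if statuses.any (fun s => s == "FAIL") then "ATTENTION"
  else if statuses.any (fun s => s == "WARN") then "WATCH"
  else "HEALTHY"

-- _doctor_group_summary; the four printed keys are initialised to 0 before the loop, so the
-- final counts['OK'] … lookups always succeed: getD is exact here
def pvA_group_summary (group_name : String) (group_checks : List (String × String × String)) : String :=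
  let counts : PySem.Dict String Int :=
    ((((PySem.Dict.empty).insert "OK" 0).insert "WARN" 0).insert "FAIL" 0).insert "INFO" 0
  let counts := group_checks.foldl (fun d t => d.insert t.1 (d.getD t.1 0 + 1)) counts
  group_name ++ " status=" ++ pvA_group_status group_checks ++ " (ok=" ++
    PySem.Int.toStr (counts.getD "OK" 0) ++ ", warn=" ++ PySem.Int.toStr (counts.getD "WARN" 0) ++
    ", fail=" ++ PySem.Int.toStr (counts.getD "FAIL" 0) ++ ", info=" ++
    PySem.Int.toStr (counts.getD "INFO" 0) ++ ")"

def doctor_bootstrap_checklist_py (grouped_checks : List (String × (List (String × String × String)))) (runbook_steps : List (List (String × String))) : List String :=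
  let checklist := grouped_checks.foldl (fun acc g =>
    let group_status := pvA_group_status g.2
    let checked := if group_status == "HEALTHY" then "[x]" else "[ ]"
    acc ++ [checked ++ " " ++ g.1 ++ " - " ++ pvA_group_summary g.1 g.2]) []
  let final_checked := if runbook_steps.isEmpty then "[x]" else "[ ]"
  let final_detail :=
    if !runbook_steps.isEmpty then "re-run `amem doctor .` and confirm no remaining WARN / FAIL steps"
    else "latest `amem doctor .` already reflects the current healthy state"
  checklist ++ [final_checked ++ " Final verification - " ++ final_detail]

-- ===== PORT B =====
def pvB_group_line (name : String) (gcs : List (String × String × String)) : String :=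
  let c := gcs.foldl (fun (acc : Int × Int × Int × Int) t =>
      if t.1 == "OK" then (acc.1 + 1, acc.2.1, acc.2.2.1, acc.2.2.2)
      else if t.1 == "WARN" then (acc.1, acc.2.1 + 1, acc.2.2.1, acc.2.2.2)
      else if t.1 == "FAIL" then (acc.1, acc.2.1, acc.2.2.1 + 1, acc.2.2.2)
      else if t.1 == "INFO" then (acc.1, acc.2.1, acc.2.2.1, acc.2.2.2 + 1)
      else acc) (0, 0, 0, 0)
  let status_word := if c.2.2.1 > 0 then "ATTENTION" else if c.2.1 > 0 then "WATCH" else "HEALTHY"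
  let box := if c.2.2.1 > 0 || c.2.1 > 0 then "[ ]" else "[x]"
  box ++ " " ++ name ++ " - " ++ name ++ " status=" ++ status_word ++ " (ok=" ++
    PySem.Int.toStr c.1 ++ ", warn=" ++ PySem.Int.toStr c.2.1 ++ ", fail=" ++
    PySem.Int.toStr c.2.2.1 ++ ", info=" ++ PySem.Int.toStr c.2.2.2 ++ ")"

def doctor_bootstrap_checklist_py_alt (grouped_checks : List (String × (List (String × String × String)))) (runbook_steps : List (List (String × String))) : List String :=
  grouped_checks.map (fun g => pvB_group_line g.1 g.2) ++
  [if runbook_steps.isEmpty then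
      "[x] Final verification - latest `amem doctor .` already reflects the current healthy state"
    else
      "[ ] Final verification - re-run `amem doctor .` and confirm no remaining WARN / FAIL steps"]

-- ===== PRECONDITION & SPEC =====
def Spec_doctor_bootstrap_checklist_py (grouped_checks : List (String × (List (String × String × String)))) (runbook_steps : List (List (String × String))) (out : List String) : Prop := out = doctor_bootstrap_checklist_py_alt grouped_checks runbook_steps
instance (grouped_checks : List (String × (List (String × String × String)))) (runbook_steps : List (List (String × String))) (out : List String) : Decidable (Spec_doctor_bootstrap_checklist_py grouped_checks runbook_steps out) := by unfold Spec_doctor_bootstrap_checklist_py; infer_instance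

-- ===== CLAIM (what is proved, stated in full; the proofs are below) =====
def Claim_equal_doctor_bootstrap_checklist_py : Prop := ∀ (grouped_checks : List (String × (List (String × String × String)))) (runbook_steps : List (List (String × String))), Dom_doctor_bootstrap_checklist_py grouped_checks runbook_steps → Spec_doctor_bootstrap_checklist_py grouped_checks runbook_steps (doctor_bootstrap_checklist_py grouped_checks runbook_steps)

-- ===== LEMMAS AND PROOFS =====

-- B's single-pass counter tuple equals the four status counts
theorem pvB_fold_counts (gcs : List (String × String × String)) (a b c d : Int) :
    gcs.foldl (fun (acc : Int × Int × Int × Int) t =>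
      if t.1 == "OK" then (acc.1 + 1, acc.2.1, acc.2.2.1, acc.2.2.2)
      else if t.1 == "WARN" then (acc.1, acc.2.1 + 1, acc.2.2.1, acc.2.2.2)
      else if t.1 == "FAIL" then (acc.1, acc.2.1, acc.2.2.1 + 1, acc.2.2.2)
      else if t.1 == "INFO" then (acc.1, acc.2.1, acc.2.2.1, acc.2.2.2 + 1)
      else acc) (a, b, c, d) =
    (a + ((gcs.map (fun t => t.1)).count "OK" : Int),
     b + ((gcs.map (fun t => t.1)).count "WARN" : Int),
     c + ((gcs.map (fun t => t.1)).count "FAIL" : Int),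
     d + ((gcs.map (fun t => t.1)).count "INFO" : Int)) := by
  induction gcs generalizing a b c d with
  | nil => simp
  | cons t ts ih =>
    simp only [List.foldl_cons, List.map_cons, List.count_cons]
    by_cases h1 : t.1 = "OK" <;> by_cases h2 : t.1 = "WARN" <;>
      by_cases h3 : t.1 = "FAIL" <;> by_cases h4 : t.1 = "INFO" <;> simp_all <;> omega

-- A's dict-counting loop, read back at the four initialised keys
theorem pvA_counts (gcs : List (String × String × String)) (k : String)
    (hk : k = "OK" ∨ k = "WARN" ∨ k = "FAIL" ∨ k = "INFO") :
    (gcs.foldl (fun d t => d.insert t.1 (d.getD t.1 0 + 1))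
      (((((PySem.Dict.empty).insert "OK" (0:Int)).insert "WARN" 0).insert "FAIL" 0).insert "INFO" 0)).getD k 0
    = ((gcs.map (fun t => t.1)).count k : Int) := by
  have h := PySem.Dict.getD_foldl_insert_add_one (l := gcs.map (fun t => t.1))
    (d := ((((PySem.Dict.empty).insert "OK" (0:Int)).insert "WARN" 0).insert "FAIL" 0).insert "INFO" 0)
    (v := k)
  rw [List.foldl_map] at h
  rw [h]
  rcases hk with h | h | h | h <;> subst h <;> simp [PySem.Dict.getD_insert]

-- any (status == k) ↔ positive count
theorem pvAny_count (s : List String) (k : String) :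
    s.any (fun x => x == k) = decide (0 < (s.count k : Int)) := by
  by_cases h : k ∈ s
  · have hc : 0 < (s.count k : Int) := by exact_mod_cast List.count_pos_iff.mpr h
    simp [List.any_beq', h]
  · simp [List.any_beq', h, List.count_eq_zero.mpr h]

theorem pvLine_eq (name : String) (gcs : List (String × String × String)) :
    (if pvA_group_status gcs == "HEALTHY" then "[x]" else "[ ]") ++ " " ++ name ++ " - " ++
      pvA_group_summary name gcs = pvB_group_line name gcs := by
  unfold pvA_group_summary pvB_group_line pvA_group_status
  simp only [pvB_fold_counts]
  rw [pvA_counts gcs "OK" (by tauto), pvA_counts gcs "WARN" (by tauto),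
      pvA_counts gcs "FAIL" (by tauto), pvA_counts gcs "INFO" (by tauto)]
  simp only [pvAny_count]
  by_cases hf : (gcs.map (fun t => t.1)).count "FAIL" = 0 <;>
    by_cases hw : (gcs.map (fun t => t.1)).count "WARN" = 0 <;>
    simp [hf, hw, Nat.pos_iff_ne_zero, String.append_assoc]

-- ===== VERDICT (by name: the statement is the Claim_ definition above) =====
theorem doctor_bootstrap_checklist_py_spec : Claim_equal_doctor_bootstrap_checklist_py := by
  intro gc rb _
  unfold Spec_doctor_bootstrap_checklist_py doctor_bootstrap_checklist_py doctor_bootstrap_checklist_py_alt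
  have hfold : ∀ (l : List (String × List (String × String × String))) (acc : List String),
      l.foldl (fun acc g =>
        let group_status := pvA_group_status g.2
        let checked := if group_status == "HEALTHY" then "[x]" else "[ ]"
        acc ++ [checked ++ " " ++ g.1 ++ " - " ++ pvA_group_summary g.1 g.2]) acc =
      acc ++ l.map (fun g =>
        (if pvA_group_status g.2 == "HEALTHY" then "[x]" else "[ ]") ++ " " ++ g.1 ++ " - " ++
          pvA_group_summary g.1 g.2) := by
    intro l
    induction l with
    | nil => intro acc; simp
    | cons x xs ih => intro acc; rw [List.foldl_cons, ih]; simp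
  rw [hfold, List.nil_append,
      List.map_congr_left (fun g _ => pvLine_eq g.1 g.2)]
  cases rb <;> simp
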